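-- pv_equiv track=rewrite | github.com/ChouFredes/Progra-I | ejercicios/TP 2/tp2 ejercicio 1.py | funcion4
-- ===== SOURCE A (Python) =====
-- def funcion4(lista):
--     i=0
--     x=-1
--     valor=False
--     if len(lista)%2!=0:
--         while lista[i]==lista[x] and i<(len(lista)-1):
--             valor=True
--             i=i+1
--             x=x-1
--     return valor
-- ===== SOURCE B (Python) =====
-- def funcion4(lista):
--     # Constant-time closed form: valor is only ever set True, so A's loop
--     # result depends only on length parity/size and the first/last elements.
--     if len(lista) % 2 == 0 or len(lista) <= 1:
--         return False
--     return lista[0] == lista[-1]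
-- ===== Notes on version B (the rewrite author's own statement) =====
-- stated objective: simpler
-- what changed: Replaced the two-pointer while loop with a guard plus a single comparison of the first and last elements, since A's flag can only become True and only the first comparison decides it.
import Mathlib
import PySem

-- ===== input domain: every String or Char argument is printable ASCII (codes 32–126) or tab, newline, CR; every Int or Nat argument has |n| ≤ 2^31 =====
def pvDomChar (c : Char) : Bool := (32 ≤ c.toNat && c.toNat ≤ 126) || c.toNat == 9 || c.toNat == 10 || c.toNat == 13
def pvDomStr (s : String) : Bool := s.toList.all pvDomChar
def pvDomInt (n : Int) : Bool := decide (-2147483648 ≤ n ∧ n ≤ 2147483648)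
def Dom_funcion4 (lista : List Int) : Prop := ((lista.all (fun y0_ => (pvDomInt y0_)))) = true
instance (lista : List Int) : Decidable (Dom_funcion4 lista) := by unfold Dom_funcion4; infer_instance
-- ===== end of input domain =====

-- B replaces A's two-pointer while loop with a constant-time guard plus one first/last comparison.

-- ===== PORT A =====
-- The while loop of A: indices i (from 0, increasing) and x (from -1, decreasing);
-- inside the loop both indices are always in range, so Python indexing never raises;
-- the Option-level equality of pyGet? matches Python's element equality there.
def funcion4Loop (lista : List Int) (i x : Int) (valor : Bool) : Bool :=
  if h : PySem.List.pyGet? lista i = PySem.List.pyGet? lista x ∧ i < (lista.length : Int) - 1 then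
    funcion4Loop lista (i + 1) (x - 1) true
  else valor
termination_by ((lista.length : Int) - i).toNat
decreasing_by omega

def funcion4 (lista : List Int) : Bool :=
  if (lista.length : Int) % 2 ≠ 0 then funcion4Loop lista 0 (-1) false
  else false

-- ===== PORT B =====
def funcion4_alt (lista : List Int) : Bool :=
  if (lista.length : Int) % 2 == 0 || (lista.length : Int) ≤ 1 then false
  else decide (PySem.List.pyGet? lista 0 = PySem.List.pyGet? lista (-1))

-- ===== PRECONDITION & SPEC =====
def Spec_funcion4 (lista : List Int) (out : Bool) : Prop := out = funcion4_alt lista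
instance (lista : List Int) (out : Bool) : Decidable (Spec_funcion4 lista out) := by unfold Spec_funcion4; infer_instance

-- ===== CLAIM (what is proved, stated in full; the proofs are below) =====
def Claim_equal_funcion4 : Prop := ∀ (lista : List Int), Dom_funcion4 lista → Spec_funcion4 lista (funcion4 lista)

-- ===== LEMMAS AND PROOFS =====

-- Once valor is True it can never change: the loop returns True.
theorem funcion4Loop_true (lista : List Int) (i x : Int) :
    funcion4Loop lista i x true = true := by
  rw [funcion4Loop]
  split
  · exact funcion4Loop_true lista (i + 1) (x - 1)
  · rfl
termination_by ((lista.length : Int) - i).toNat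
decreasing_by rename_i h; omega

theorem funcion4_spec : Claim_equal_funcion4 := by
  intro lista _
  unfold Spec_funcion4 funcion4 funcion4_alt
  by_cases hpar : (lista.length : Int) % 2 = 0
  · simp [hpar]
  · simp only [hpar, ne_eq, not_false_iff, if_pos]
    by_cases hlen : (lista.length : Int) ≤ 1
    · -- length 0 is even, so length = 1 here: loop guard i < len-1 fails at once
      rw [funcion4Loop]
      have h1 : lista.length = 1 := by omega
      simp [h1]
    · -- length ≥ 3 (odd): one unfolding decides by lista[0] = lista[-1]
      rw [funcion4Loop]
      have hlt : (0:Int) < (lista.length : Int) - 1 := by omega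
      have h1 : 1 < lista.length := by omega
      by_cases heq : PySem.List.pyGet? lista 0 = PySem.List.pyGet? lista (-1)
      · simp [heq, h1, hlen, funcion4Loop_true]
        omega
      · simp [heq, hlen]
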